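-- pv_equiv track=rewrite | github.com/unabl4/PythonCodeClub | shortest_way_back/shortest_way_back.py | shortest_way_back
-- ===== SOURCE A (Python) =====
-- def shortest_way_back(path):
--     y,x = 0,0 # initial coordinate
--     for direction in path:
--         if direction == 'N':
--             y += 1
--         elif direction == 'S':
--             y -= 1
--         elif direction == 'E':
--             x += 1
--         elif direction == 'W':
--             x -= 1
--
--     back_path = ''
--     if y != 0:
--         back_path += (y * 'S' if y > 0 else -y * 'N')
--     if x != 0:
--         back_path += (x * 'W' if x > 0 else -x * 'E')
--
--     return back_path
-- ===== SOURCE B (Python) =====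
-- def shortest_way_back(path):
--     # Maintain the back-path itself: each step either cancels a pending
--     # opposite back-move or adds its inverse (vertical block kept first).
--     inv = {'N': 'S', 'S': 'N', 'E': 'W', 'W': 'E'}
--     back = []
--     for d in path:
--         c = inv.get(d)
--         if c is None:
--             continue
--         if d in back:
--             back.remove(d)      # this step cancels a pending back-move
--         elif d in ('N', 'S'):
--             back.insert(0, c)   # vertical block stays in front
--         else:
--             back.append(c)
--     return ''.join(back)
-- ===== Notes on version B (the rewrite author's own statement) =====
-- stated objective: alternative
-- what changed: B never tracks coordinates: it maintains the back-path list itself, where each step either cancels (removes) a pending opposite back-move already in the list or inserts the step's inverse (vertical moves at the front, horizontal appended), so the answer is the list left at the end; A instead accumulates (y,x) coordinates and builds the string from their signs afterwards.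
import Mathlib
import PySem

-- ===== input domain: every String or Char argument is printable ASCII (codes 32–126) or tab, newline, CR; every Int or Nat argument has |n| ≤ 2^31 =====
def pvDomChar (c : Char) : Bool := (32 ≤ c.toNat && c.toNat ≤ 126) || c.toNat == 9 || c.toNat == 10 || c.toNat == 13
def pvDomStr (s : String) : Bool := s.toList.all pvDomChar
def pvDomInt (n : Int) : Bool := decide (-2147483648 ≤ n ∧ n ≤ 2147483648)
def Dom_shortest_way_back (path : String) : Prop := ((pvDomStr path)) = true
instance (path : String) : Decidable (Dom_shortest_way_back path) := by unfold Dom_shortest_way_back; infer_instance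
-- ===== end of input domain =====

-- B keeps no coordinates at all: it maintains the back-path list itself, cancelling a
-- pending opposite back-move or inserting the inverse move (vertical block first);
-- alternative algorithm, same return value.

-- ===== PORT A =====
def shortest_way_back (path : String) : String :=
  -- y,x = 0,0; for direction in path: if/elif chain
  let p := path.toList.foldl (fun (s : Int × Int) d =>
    if d == 'N' then (s.1 + 1, s.2)
    else if d == 'S' then (s.1 - 1, s.2)
    else if d == 'E' then (s.1, s.2 + 1)
    else if d == 'W' then (s.1, s.2 - 1)
    else s) (0, 0)
  let y := p.1
  let x := p.2
  -- back_path = ''; the two conditional appends ('n * c' is List.replicate n.toNat c, exact)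
  let back0 : List Char := []
  let back1 := if y ≠ 0 then back0 ++ (if y > 0 then List.replicate y.toNat 'S'
                                       else List.replicate (-y).toNat 'N') else back0
  let back2 := if x ≠ 0 then back1 ++ (if x > 0 then List.replicate x.toNat 'W'
                                       else List.replicate (-x).toNat 'E') else back1
  String.mk back2

-- ===== PORT B =====
-- inv = {'N':'S','S':'N','E':'W','W':'E'}
def swbInv : PySem.Dict Char Char :=
  PySem.Dict.ofList [('N', 'S'), ('S', 'N'), ('E', 'W'), ('W', 'E')]

-- one loop body of B: c = inv.get(d); cancel / insert front / append
def swbStep (back : List Char) (d : Char) : List Char :=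
  match PySem.Dict.get? swbInv d with
  | none => back                      -- c is None: continue
  | some c =>
    if back.contains d then           -- d in back
      match PySem.List.remove? back d with   -- back.remove(d): first occurrence
      | some l => l
      | none => back                  -- unreachable (guarded by contains)
    else if d == 'N' || d == 'S' then c :: back   -- back.insert(0, c)
    else back ++ [c]                  -- back.append(c)

def shortest_way_back_alt (path : String) : String :=
  String.mk (path.toList.foldl swbStep [])   -- ''.join(back)

-- ===== PRECONDITION & SPEC =====
def Spec_shortest_way_back (path : String) (out : String) : Prop := out = shortest_way_back_alt path
instance (path : String) (out : String) : Decidable (Spec_shortest_way_back path out) := by unfold Spec_shortest_way_back; infer_instance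

-- ===== CLAIM (what is proved, stated in full; the proofs are below) =====
def Claim_equal_shortest_way_back : Prop := ∀ (path : String), Dom_shortest_way_back path → Spec_shortest_way_back path (shortest_way_back path)

-- ===== LEMMAS AND PROOFS =====

-- canonical back-path of a net displacement (y, x)
def swbRep (y x : Int) : List Char :=
  List.replicate y.toNat 'S' ++ List.replicate (-y).toNat 'N'
    ++ List.replicate x.toNat 'W' ++ List.replicate (-x).toNat 'E'

theorem swbRep_mem_N (y x : Int) : 'N' ∈ swbRep y x ↔ y < 0 := by
  simp [swbRep, List.mem_replicate]

theorem swbRep_mem_S (y x : Int) : 'S' ∈ swbRep y x ↔ 0 < y := by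
  simp [swbRep, List.mem_replicate]

theorem swbRep_mem_E (y x : Int) : 'E' ∈ swbRep y x ↔ x < 0 := by
  simp [swbRep, List.mem_replicate]

theorem swbRep_mem_W (y x : Int) : 'W' ∈ swbRep y x ↔ 0 < x := by
  simp [swbRep, List.mem_replicate]

theorem swbStep_N (y x : Int) : swbStep (swbRep y x) 'N' = swbRep (y + 1) x := by
  have hg : PySem.Dict.get? swbInv 'N' = some 'S' := by decide
  by_cases hy : y < 0
  · have hmem : 'N' ∈ swbRep y x := (swbRep_mem_N y x).mpr hy
    have hc : (swbRep y x).contains 'N' = true := List.elem_eq_true_of_mem hmem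
    simp only [swbStep, hg, hc, if_true,
      PySem.List.remove?_eq_some_erase (swbRep y x) 'N' hmem]
    unfold swbRep
    rw [show y.toNat = 0 from by omega, show (y + 1).toNat = 0 from by omega,
        show (-y).toNat = (-(y + 1)).toNat + 1 from by omega, List.replicate_succ]
    simp
  · have hc : (swbRep y x).contains 'N' = false := by
      simp [List.contains_eq_mem, (swbRep_mem_N y x).not.mpr hy]
    simp only [swbStep, hg, hc, Bool.false_eq_true, if_false,
      if_pos (by decide : ('N' == 'N' || 'N' == 'S') = true)]
    unfold swbRep
    rw [show (y + 1).toNat = y.toNat + 1 from by omega, show (-(y + 1)).toNat = 0 from by omega,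
        show (-y).toNat = 0 from by omega, List.replicate_succ]
    simp

theorem swbStep_S (y x : Int) : swbStep (swbRep y x) 'S' = swbRep (y - 1) x := by
  have hg : PySem.Dict.get? swbInv 'S' = some 'N' := by decide
  by_cases hy : 0 < y
  · have hmem : 'S' ∈ swbRep y x := (swbRep_mem_S y x).mpr hy
    have hc : (swbRep y x).contains 'S' = true := List.elem_eq_true_of_mem hmem
    simp only [swbStep, hg, hc, if_true,
      PySem.List.remove?_eq_some_erase (swbRep y x) 'S' hmem]
    unfold swbRep
    rw [show (-y).toNat = 0 from by omega, show (-(y - 1)).toNat = 0 from by omega,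
        show y.toNat = (y - 1).toNat + 1 from by omega, List.replicate_succ]
    simp
  · have hc : (swbRep y x).contains 'S' = false := by
      simp [List.contains_eq_mem, (swbRep_mem_S y x).not.mpr hy]
    simp only [swbStep, hg, hc, Bool.false_eq_true, if_false,
      if_pos (by decide : ('S' == 'N' || 'S' == 'S') = true)]
    unfold swbRep
    rw [show y.toNat = 0 from by omega, show (y - 1).toNat = 0 from by omega,
        show (-(y - 1)).toNat = (-y).toNat + 1 from by omega, List.replicate_succ]
    simp

theorem swbStep_E (y x : Int) : swbStep (swbRep y x) 'E' = swbRep y (x + 1) := by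
  have hg : PySem.Dict.get? swbInv 'E' = some 'W' := by decide
  by_cases hx : x < 0
  · have hmem : 'E' ∈ swbRep y x := (swbRep_mem_E y x).mpr hx
    have hc : (swbRep y x).contains 'E' = true := List.elem_eq_true_of_mem hmem
    simp only [swbStep, hg, hc, if_true,
      PySem.List.remove?_eq_some_erase (swbRep y x) 'E' hmem]
    unfold swbRep
    rw [show x.toNat = 0 from by omega, show (x + 1).toNat = 0 from by omega,
        show (-x).toNat = (-(x + 1)).toNat + 1 from by omega, List.replicate_succ]
    simp [List.erase_append, List.mem_replicate]
  · have hc : (swbRep y x).contains 'E' = false := by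
      simp [List.contains_eq_mem, (swbRep_mem_E y x).not.mpr hx]
    simp only [swbStep, hg, hc, Bool.false_eq_true, if_false,
      if_neg (by decide : ¬ ('E' == 'N' || 'E' == 'S') = true)]
    unfold swbRep
    rw [show (x + 1).toNat = x.toNat + 1 from by omega, show (-(x + 1)).toNat = 0 from by omega,
        show (-x).toNat = 0 from by omega, List.replicate_succ']
    simp

theorem swbStep_W (y x : Int) : swbStep (swbRep y x) 'W' = swbRep y (x - 1) := by
  have hg : PySem.Dict.get? swbInv 'W' = some 'E' := by decide
  by_cases hx : 0 < x
  · have hmem : 'W' ∈ swbRep y x := (swbRep_mem_W y x).mpr hx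
    have hc : (swbRep y x).contains 'W' = true := List.elem_eq_true_of_mem hmem
    simp only [swbStep, hg, hc, if_true,
      PySem.List.remove?_eq_some_erase (swbRep y x) 'W' hmem]
    unfold swbRep
    rw [show (-x).toNat = 0 from by omega, show (-(x - 1)).toNat = 0 from by omega,
        show x.toNat = (x - 1).toNat + 1 from by omega, List.replicate_succ]
    simp [List.erase_append, List.mem_replicate]
  · have hc : (swbRep y x).contains 'W' = false := by
      simp [List.contains_eq_mem, (swbRep_mem_W y x).not.mpr hx]
    simp only [swbStep, hg, hc, Bool.false_eq_true, if_false,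
      if_neg (by decide : ¬ ('W' == 'N' || 'W' == 'S') = true)]
    unfold swbRep
    rw [show x.toNat = 0 from by omega, show (x - 1).toNat = 0 from by omega,
        show (-(x - 1)).toNat = (-x).toNat + 1 from by omega, List.replicate_succ']
    simp

theorem swbStep_other (y x : Int) (d : Char)
    (h1 : d ≠ 'N') (h2 : d ≠ 'S') (h3 : d ≠ 'E') (h4 : d ≠ 'W') :
    swbStep (swbRep y x) d = swbRep y x := by
  have hg : PySem.Dict.get? swbInv d = none := by
    have h : swbInv = PySem.Dict.mk [('N', 'S'), ('S', 'N'), ('E', 'W'), ('W', 'E')] := by decide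
    rw [h]
    simp [PySem.Dict.get?, beq_iff_eq, Ne.symm h1, Ne.symm h2, Ne.symm h3, Ne.symm h4]
  simp [swbStep, hg]

-- B's fold from a canonical state tracks A's coordinate fold
theorem swbFold_rep (l : List Char) (y x : Int) :
    l.foldl swbStep (swbRep y x)
      = swbRep (l.foldl (fun (s : Int × Int) d =>
          if d == 'N' then (s.1 + 1, s.2)
          else if d == 'S' then (s.1 - 1, s.2)
          else if d == 'E' then (s.1, s.2 + 1)
          else if d == 'W' then (s.1, s.2 - 1)
          else s) (y, x)).1
        (l.foldl (fun (s : Int × Int) d =>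
          if d == 'N' then (s.1 + 1, s.2)
          else if d == 'S' then (s.1 - 1, s.2)
          else if d == 'E' then (s.1, s.2 + 1)
          else if d == 'W' then (s.1, s.2 - 1)
          else s) (y, x)).2 := by
  induction l generalizing y x with
  | nil => simp
  | cons hd t ih =>
    simp only [List.foldl_cons]
    by_cases h1 : hd = 'N'
    · subst h1; rw [swbStep_N]; exact ih (y + 1) x
    · by_cases h2 : hd = 'S'
      · subst h2; rw [swbStep_S]; exact ih (y - 1) x
      · by_cases h3 : hd = 'E'
        · subst h3; rw [swbStep_E]; exact ih y (x + 1)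
        · by_cases h4 : hd = 'W'
          · subst h4; rw [swbStep_W]; exact ih y (x - 1)
          · rw [swbStep_other y x hd h1 h2 h3 h4,
              if_neg (by simp [h1]), if_neg (by simp [h2]),
              if_neg (by simp [h3]), if_neg (by simp [h4])]
            exact ih y x

-- A's guarded append equals the canonical block, for one axis.
theorem swb_tail_axis (n : Int) (cpos cneg : Char) :
    (if n ≠ 0 then (if n > 0 then List.replicate n.toNat cpos
                    else List.replicate (-n).toNat cneg) else [])
    = List.replicate n.toNat cpos ++ List.replicate (-n).toNat cneg := by
  rcases lt_trichotomy n 0 with h | h | h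
  · have h1 : n.toNat = 0 := Int.toNat_of_nonpos (le_of_lt h)
    simp [h.ne, not_lt_of_gt h, h1]
  · simp [h]
  · have h1 : (-n).toNat = 0 := Int.toNat_of_nonpos (by omega)
    simp [h.ne', h, h1]

-- ===== VERDICT (by name: the statement is the Claim_ definition above) =====
theorem shortest_way_back_spec : Claim_equal_shortest_way_back := by
  intro path _
  unfold Spec_shortest_way_back shortest_way_back shortest_way_back_alt
  conv_rhs => rw [show ([] : List Char) = swbRep 0 0 from by decide, swbFold_rep]
  generalize (path.toList.foldl (fun (s : Int × Int) d =>
    if d == 'N' then (s.1 + 1, s.2)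
    else if d == 'S' then (s.1 - 1, s.2)
    else if d == 'E' then (s.1, s.2 + 1)
    else if d == 'W' then (s.1, s.2 - 1)
    else s) (0, 0)) = p
  have hY := swb_tail_axis p.1 'S' 'N'
  have hX := swb_tail_axis p.2 'W' 'E'
  simp only [List.nil_append]
  rw [hY, swbRep]
  rcases lt_trichotomy p.2 0 with h | h | h
  · rw [if_pos h.ne, if_neg (by omega)]
    rw [show p.2.toNat = 0 from by omega]
    simp
  · rw [if_neg (by simp [h]), h]
    simp
  · rw [if_pos h.ne', if_pos h]
    rw [show (-p.2).toNat = 0 from by omega]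
    simp
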